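-- pv_equiv track=rewrite | github.com/fanatik19/test_repo | Pyramid.py | define_number
-- ===== SOURCE A (Python) =====
-- def define_number(n, m):
--     number = 0
--     while True:
--         number += n*m
--         n -= 1
--         m -= 1
--         if n == 0 or m == 0:
--             break
--     return number
-- ===== SOURCE B (Python) =====
-- def define_number(n, m):
--     # closed form for sum_{k=0}^{t-1} (n-k)*(m-k) with t = min(n, m) terms
--     t = min(n, m)
--     return t*n*m - (n + m) * (t*(t-1)//2) + (t-1)*t*(2*t-1)//6
-- ===== Notes on version B (the rewrite author's own statement) =====
-- stated objective: faster
-- what changed: Replaced the decrement-until-zero accumulation loop by the O(1) closed-form sum of (n-k)(m-k) over t=min(n,m) terms; Pre_ restricts to positive arguments, the natural domain: with both arguments < 1 A loops forever, and with exactly one >= 1 the corner is unspecified (A multiplies past zero, B evaluates the closed form at min(n,m)) and either value is defensible.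
-- outside the precondition, e.g. on define_number(0, 3): A returns -4, B returns 0; on define_number(4, -1): A returns -20, B returns 0; on define_number(0, 0): A does not finish within the time limit, B returns 0
import Mathlib
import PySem

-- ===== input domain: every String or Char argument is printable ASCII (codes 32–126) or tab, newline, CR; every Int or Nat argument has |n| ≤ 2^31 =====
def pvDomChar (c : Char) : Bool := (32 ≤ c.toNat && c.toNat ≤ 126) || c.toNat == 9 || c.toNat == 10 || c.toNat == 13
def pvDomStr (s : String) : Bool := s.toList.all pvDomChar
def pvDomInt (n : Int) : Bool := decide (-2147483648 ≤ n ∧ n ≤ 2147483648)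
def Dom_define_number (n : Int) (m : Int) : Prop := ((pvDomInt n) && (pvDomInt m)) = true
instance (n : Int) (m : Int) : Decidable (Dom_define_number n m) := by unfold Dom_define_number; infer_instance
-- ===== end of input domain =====

-- B replaces A's decrement-until-zero loop by the O(1) closed-form sum of (n-k)(m-k) over t = min(n,m) terms (objective: faster).

-- ===== PORT A =====
-- A's while-True loop, step for step; fuel is an upper bound on the iteration
-- count (under Pre_ the loop runs exactly min(n,m) times), the 0-fuel branch is never reached on Pre_.
def pvLoopA : Nat → Int → Int → Int → Int
  | 0, _, _, number => number
  | fuel + 1, n, m, number =>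
    let number' := number + n * m
    let n' := n - 1
    let m' := m - 1
    if n' = 0 ∨ m' = 0 then number' else pvLoopA fuel n' m' number'

def define_number (n : Int) (m : Int) : Int :=
  pvLoopA (n.toNat ⊔ m.toNat + 1) n m 0

-- ===== PORT B =====
def define_number_alt (n : Int) (m : Int) : Int :=
  let t : Int := min n m
  t * n * m - (n + m) * (PySem.Int.floordiv (t * (t - 1)) 2)
    + PySem.Int.floordiv ((t - 1) * t * (2 * t - 1)) 6

-- ===== PRECONDITION & SPEC =====
-- Pre_ restricts to positive arguments, the function's natural domain: when both arguments are
-- < 1 A's loop never terminates (both counters skip past 0 downwards), and when exactly one is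
-- ≥ 1 no caller would specify either value — A keeps multiplying past zero, B's closed form
-- evaluates the same polynomial at min(n,m); both are defensible on that unspecified corner.
def Pre_define_number (n : Int) (m : Int) : Prop := 1 ≤ n ∧ 1 ≤ m
instance (n : Int) (m : Int) : Decidable (Pre_define_number n m) := by unfold Pre_define_number; infer_instance
def pvWitness_define_number : Int × Int := (3, 5)
def Spec_define_number (n : Int) (m : Int) (out : Int) : Prop := out = define_number_alt n m
instance (n : Int) (m : Int) (out : Int) : Decidable (Spec_define_number n m out) := by unfold Spec_define_number; infer_instance

-- ===== CLAIM (what is proved, stated in full; the proofs are below) =====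
def Claim_equal_define_number : Prop := ∀ (n : Int) (m : Int), Dom_define_number n m → Pre_define_number n m → Spec_define_number n m (define_number n m)

-- ===== LEMMAS AND PROOFS =====

-- closed-form value of the partial sums: pvC n m t = Σ_{k=0}^{t-1} (n-k)(m-k)
def pvC (n m t : Int) : Int :=
  t * n * m - (n + m) * (t * (t - 1) / 2) + (t - 1) * t * (2 * t - 1) / 6

lemma tri_step (s : Int) : (s + 1) * s / 2 = s * (s - 1) / 2 + s := by
  have h : (s + 1) * s = s * (s - 1) + s * 2 := by ring
  rw [h, Int.add_mul_ediv_right _ _ (by norm_num : (2:Int) ≠ 0)]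

lemma pyr_step (s : Int) : s * (s + 1) * (2 * s + 1) / 6 = (s - 1) * s * (2 * s - 1) / 6 + s * s := by
  have h : s * (s + 1) * (2 * s + 1) = (s - 1) * s * (2 * s - 1) + (s * s) * 6 := by ring
  rw [h, Int.add_mul_ediv_right _ _ (by norm_num : (6:Int) ≠ 0)]

lemma two_dvd_tri (s : Int) : (2:Int) ∣ s * (s - 1) := Int.even_mul_pred_self s |>.two_dvd

lemma pvC_step (n m t : Int) :
    pvC n m t = n * m + pvC (n - 1) (m - 1) (t - 1) := by
  unfold pvC
  have h2 : t * (t - 1) / 2 = (t - 1) * (t - 1 - 1) / 2 + (t - 1) := by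
    have h := tri_step (t - 1)
    rw [show (t - 1 + 1) * (t - 1) = t * (t - 1) from by ring] at h
    exact h
  have h6 : (t - 1) * t * (2 * t - 1) / 6
      = (t - 1 - 1) * (t - 1) * (2 * (t - 1) - 1) / 6 + (t - 1) * (t - 1) := by
    have h := pyr_step (t - 1)
    rw [show (t - 1) * (t - 1 + 1) * (2 * (t - 1) + 1) = (t - 1) * t * (2 * t - 1) from by ring] at h
    exact h
  obtain ⟨q, hq⟩ := two_dvd_tri (t - 1)
  have hq2 : (t - 1) * (t - 1 - 1) / 2 = q := by
    rw [hq]; exact Int.mul_ediv_cancel_left q (by norm_num)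
  rw [h2, h6, hq2]
  linear_combination hq

lemma pvC_one (n m : Int) : pvC n m 1 = n * m := by
  unfold pvC; norm_num

lemma loopA_closed (fuel : Nat) :
    ∀ n m acc : Int, 1 ≤ n → 1 ≤ m → (min n m).toNat ≤ fuel →
      pvLoopA fuel n m acc = acc + pvC n m (min n m) := by
  induction fuel with
  | zero =>
    intro n m acc hn hm hf
    omega
  | succ k ih =>
    intro n m acc hn hm hf
    simp only [pvLoopA]
    split_ifs with hstop
    · have ht1 : min n m = 1 := by omega
      rw [ht1, pvC_one]
    · have hmin : min (n - 1) (m - 1) = min n m - 1 := by omega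
      rw [ih (n - 1) (m - 1) (acc + n * m) (by omega) (by omega) (by omega)]
      rw [hmin, pvC_step n m (min n m)]
      ring

lemma alt_eq_pvC (n m : Int) :
    define_number_alt n m = pvC n m (min n m) := by
  unfold define_number_alt pvC
  simp only [PySem.Int.floordiv_eq_ediv_of_pos (by norm_num : (0:Int) < 2),
      PySem.Int.floordiv_eq_ediv_of_pos (by norm_num : (0:Int) < 6)]

-- ===== VERDICT (by name: the statement is the Claim_ definition above) =====
theorem define_number_spec : Claim_equal_define_number := by
  intro n m _hdom ⟨hn, hm⟩
  unfold Spec_define_number define_number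
  rw [loopA_closed _ n m 0 hn hm (by omega), alt_eq_pvC n m]
  ring
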